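-- pv_equiv track=rewrite | github.com/kartsridhar/Problem-Solving | Ocado/maxSum.py | splitAtNeg
-- ===== SOURCE A (Python) =====
-- def splitAtNeg(A):
--     new, group = [], []
--     for i in A:
--         if i < 0:
--             if group:
--                 new.append(group)
--                 group = []
--         else:
--             group.append(i)
--     if group:
--         new.append(group)
--     return new
-- ===== SOURCE B (Python) =====
-- def splitAtNeg(A):
--     # Index-based skip/take scan: skip a negative, otherwise locate the end j
--     # of the maximal non-negative run and emit A[i:j] as one group.
--     out = []
--     i, n = 0, len(A)
--     while i < n:
--         if A[i] < 0:
--             i += 1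
--         else:
--             j = i
--             while j < n and A[j] >= 0:
--                 j += 1
--             out.append(A[i:j])
--             i = j
--     return out
-- ===== Notes on version B (the rewrite author's own statement) =====
-- stated objective: alternative
-- what changed: Replaces A's accumulate-and-flush state machine (a manual group buffer flushed at each negative and at the end) with an index-based skip/take scan: skip a negative, otherwise find the end j of the maximal non-negative run with an inner scan and emit the slice A[i:j] as one group.
import Mathlib
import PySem

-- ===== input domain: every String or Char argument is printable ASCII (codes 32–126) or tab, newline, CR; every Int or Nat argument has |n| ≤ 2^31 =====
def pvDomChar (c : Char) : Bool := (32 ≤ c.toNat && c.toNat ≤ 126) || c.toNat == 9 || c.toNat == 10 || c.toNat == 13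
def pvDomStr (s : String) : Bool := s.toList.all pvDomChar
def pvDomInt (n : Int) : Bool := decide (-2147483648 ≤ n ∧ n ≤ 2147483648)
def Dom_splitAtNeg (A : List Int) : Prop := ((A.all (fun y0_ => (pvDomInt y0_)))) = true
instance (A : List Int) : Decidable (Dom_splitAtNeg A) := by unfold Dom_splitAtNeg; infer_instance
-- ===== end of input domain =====

-- B replaces A's accumulate-and-flush buffer state machine by a recursive
-- skip/take decomposition (skip a negative, emit the maximal non-negative run,
-- recurse on the rest); same O(n) cost, different structure.

-- ===== PORT A =====
-- A: fold over the list carrying (new, group); flush group at negatives and at the end.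
def splitAtNegStep (s : List (List Int) × List Int) (i : Int) : List (List Int) × List Int :=
  if i < 0 then
    if s.2 ≠ [] then (s.1 ++ [s.2], []) else s
  else
    (s.1, s.2 ++ [i])

def splitAtNeg (A : List Int) : List (List Int) :=
  let s := A.foldl splitAtNegStep ([], [])
  if s.2 ≠ [] then s.1 ++ [s.2] else s.1

-- ===== PORT B =====
-- B: index-based skip/take scan from Source B.  runEnd is the inner
-- 'while j < n and A[j] >= 0: j += 1' loop; A[i:j] is ported as drop/take
-- (both indices are natural and j ≤ |A|, so the slice is exact).
def splitAtNeg_runEnd (A : List Int) (j : Nat) : Nat :=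
  if h : j < A.length then
    if 0 ≤ A[j] then splitAtNeg_runEnd A (j + 1) else j
  else j
termination_by A.length - j

-- termination helper for the port's decreasing_by (cited by name there)
theorem splitAtNeg_runEnd_ge (A : List Int) (j : Nat) : j ≤ splitAtNeg_runEnd A j := by
  rw [splitAtNeg_runEnd]
  split
  · split
    · exact Nat.le_trans (by omega) (splitAtNeg_runEnd_ge A (j + 1))
    · exact Nat.le_refl j
  · exact Nat.le_refl j
termination_by A.length - j

def splitAtNeg_altGo (A : List Int) (i : Nat) : List (List Int) :=
  if h : i < A.length then
    if A[i] < 0 then splitAtNeg_altGo A (i + 1)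
    else
      let j := splitAtNeg_runEnd A i
      ((A.drop i).take (j - i)) :: splitAtNeg_altGo A j
  else []
termination_by A.length - i
decreasing_by
  · omega
  · have hge : i + 1 ≤ splitAtNeg_runEnd A i := by
      rw [splitAtNeg_runEnd]
      simp only [h, dif_pos]
      have : (0:Int) ≤ A[i] := by omega
      simp only [this, if_pos]
      exact splitAtNeg_runEnd_ge A (i + 1)
    omega

def splitAtNeg_alt (A : List Int) : List (List Int) := splitAtNeg_altGo A 0

-- ===== PRECONDITION & SPEC =====
def Spec_splitAtNeg (A : List Int) (out : List (List Int)) : Prop := out = splitAtNeg_alt A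
instance (A : List Int) (out : List (List Int)) : Decidable (Spec_splitAtNeg A out) := by unfold Spec_splitAtNeg; infer_instance

-- ===== CLAIM (what is proved, stated in full; the proofs are below) =====
def Claim_equal_splitAtNeg : Prop := ∀ (A : List Int), Dom_splitAtNeg A → Spec_splitAtNeg A (splitAtNeg A)

-- ===== LEMMAS AND PROOFS =====

-- Reference recursion on the suffix list (proof bridge between the two shapes).
def altP (g : List Int) : List Int → List (List Int)
  | [] => if g ≠ [] then [g] else []
  | x :: xs => if x < 0 then (if g ≠ [] then g :: altP [] xs else altP [] xs)
               else altP (g ++ [x]) xs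

def goRec : List Int → List (List Int)
  | [] => []
  | x :: xs =>
    if x < 0 then goRec xs
    else
      (x :: xs.takeWhile (fun y => decide (0 ≤ y))) ::
        goRec (xs.dropWhile (fun y => decide (0 ≤ y)))
termination_by xs => xs.length
decreasing_by
  · simp
  · simp only [List.length_cons]
    exact Nat.lt_succ_of_le (List.length_dropWhile_le _ _)

theorem goRec_nil : goRec [] = [] := by simp [goRec]

theorem goRec_neg (x : Int) (xs : List Int) (hx : x < 0) :
    goRec (x :: xs) = goRec xs := by
  rw [goRec]; simp [hx]

theorem goRec_nonneg (x : Int) (xs : List Int) (hx : ¬ x < 0) :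
    goRec (x :: xs) =
      (x :: xs.takeWhile (fun y => decide (0 ≤ y))) ::
        goRec (xs.dropWhile (fun y => decide (0 ≤ y))) := by
  rw [goRec]; simp [hx]

-- runEnd characterised by takeWhile/dropWhile on the suffix.
theorem runEnd_spec (A : List Int) (j : Nat) :
    (A.drop j).take (splitAtNeg_runEnd A j - j)
        = (A.drop j).takeWhile (fun y => decide (0 ≤ y)) ∧
      A.drop (splitAtNeg_runEnd A j)
        = (A.drop j).dropWhile (fun y => decide (0 ≤ y)) := by
  by_cases h : j < A.length
  · rw [splitAtNeg_runEnd]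
    simp only [h, dif_pos]
    by_cases hp : (0:Int) ≤ A[j]
    · have ih := runEnd_spec A (j + 1)
      have hge := splitAtNeg_runEnd_ge A (j + 1)
      simp only [hp, if_pos]
      constructor
      · have e : splitAtNeg_runEnd A (j + 1) - j
            = (splitAtNeg_runEnd A (j + 1) - (j + 1)) + 1 := by omega
        rw [e, List.drop_eq_getElem_cons h, List.take_succ_cons,
          List.takeWhile_cons, ih.1]
        simp [hp]
      · rw [ih.2, List.drop_eq_getElem_cons h, List.dropWhile_cons]
        simp [hp]
    · simp only [hp, decide_false, if_false]
      rw [List.drop_eq_getElem_cons h, List.takeWhile_cons, List.dropWhile_cons]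
      simp [hp]
  · have hd : A.drop j = [] := List.drop_eq_nil_of_le (by omega)
    rw [splitAtNeg_runEnd]
    simp [h, hd]
termination_by A.length - j

theorem altGo_eq_goRec (A : List Int) (i : Nat) :
    splitAtNeg_altGo A i = goRec (A.drop i) := by
  by_cases h : i < A.length
  · rw [splitAtNeg_altGo]
    simp only [h, dif_pos]
    by_cases hx : A[i] < 0
    · rw [if_pos hx, altGo_eq_goRec A (i + 1),
        List.drop_eq_getElem_cons h, goRec_neg _ _ hx]
    · rw [if_neg hx]
      have hspec := runEnd_spec A i
      have hnn : (0:Int) ≤ A[i] := by omega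
      have hge : i + 1 ≤ splitAtNeg_runEnd A i := by
        rw [splitAtNeg_runEnd]
        simp only [h, dif_pos, hnn, decide_true, if_true]
        exact splitAtNeg_runEnd_ge A (i + 1)
      have htake : (A.drop i).take (splitAtNeg_runEnd A i - i)
          = A[i] :: (A.drop (i + 1)).takeWhile (fun y => decide (0 ≤ y)) := by
        rw [hspec.1, List.drop_eq_getElem_cons h, List.takeWhile_cons]
        simp [hnn]
      have hdrop : A.drop (splitAtNeg_runEnd A i)
          = (A.drop (i + 1)).dropWhile (fun y => decide (0 ≤ y)) := by
        rw [hspec.2, List.drop_eq_getElem_cons h, List.dropWhile_cons]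
        simp [hnn]
      rw [htake, altGo_eq_goRec A (splitAtNeg_runEnd A i), hdrop,
        List.drop_eq_getElem_cons h, goRec_nonneg _ _ hx]
  · have hd : A.drop i = [] := List.drop_eq_nil_of_le (by omega)
    rw [splitAtNeg_altGo]
    simp [h, hd, goRec_nil]
termination_by A.length - i
decreasing_by
  · omega
  · omega

theorem altP_eq_goRec (xs : List Int) : ∀ g : List Int,
    altP g xs = if g = [] then goRec xs
      else (g ++ xs.takeWhile (fun y => decide (0 ≤ y))) ::
        goRec (xs.dropWhile (fun y => decide (0 ≤ y))) := by
  induction xs with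
  | nil =>
    intro g
    by_cases h : g = [] <;> simp [altP, goRec_nil, h]
  | cons x xs ih =>
    intro g
    by_cases hx : x < 0
    · have hnn : ¬ ((0:Int) ≤ x) := by omega
      by_cases h : g = [] <;>
        simp [altP, hx, h, ih, goRec_neg x xs hx, List.takeWhile_cons,
          List.dropWhile_cons, hnn]
    · have hnn : (0 : Int) ≤ x := by omega
      have hne : g ++ [x] ≠ [] := by simp
      by_cases h : g = [] <;>
        simp [altP, hx, h, ih, hne, goRec_nonneg x xs hx, List.takeWhile_cons,
          List.dropWhile_cons, hnn, List.append_assoc]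

theorem foldl_eq_altP (xs : List Int) : ∀ (new : List (List Int)) (g : List Int),
    (let s := xs.foldl splitAtNegStep (new, g)
     if s.2 ≠ [] then s.1 ++ [s.2] else s.1) = new ++ altP g xs := by
  induction xs with
  | nil =>
    intro new g
    by_cases h : g = [] <;> simp [altP, h]
  | cons x xs ih =>
    intro new g
    by_cases hx : x < 0
    · by_cases h : g = []
      · have e : splitAtNegStep (new, g) x = (new, g) := by
          simp [splitAtNegStep, hx, h]
        rw [List.foldl_cons, e]
        simpa [altP, hx, h] using ih new g
      · have e : splitAtNegStep (new, g) x = (new ++ [g], []) := by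
          simp [splitAtNegStep, hx, h]
        rw [List.foldl_cons, e]
        have := ih (new ++ [g]) []
        simp only [this]
        simp [altP, hx, h, List.append_assoc]
    · have e : splitAtNegStep (new, g) x = (new, g ++ [x]) := by
        simp [splitAtNegStep, hx]
      rw [List.foldl_cons, e]
      have := ih new (g ++ [x])
      simp only [this]
      simp [altP, hx]

theorem splitAtNeg_eq (A : List Int) : splitAtNeg A = splitAtNeg_alt A := by
  have h := foldl_eq_altP A [] []
  have h2 := altP_eq_goRec A []
  simp only [if_pos] at h2
  have h3 := altGo_eq_goRec A 0
  simp only [List.drop_zero] at h3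
  simp only [splitAtNeg_alt, h3]
  simpa [splitAtNeg, h2] using h

-- ===== VERDICT (by name: the statement is the Claim_ definition above) =====
theorem splitAtNeg_spec : Claim_equal_splitAtNeg := by
  intro A _
  unfold Spec_splitAtNeg
  exact splitAtNeg_eq A
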